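-- pv_equiv track=rewrite | github.com/muldyrio/adventofcode | 2024/22.py | part_2
-- ===== SOURCE A (Python) =====
-- from collections import defaultdict
--
-- def mix(x: int, y: int) -> int:
-- 	return x ^ y
--
-- def prune(x: int) -> int:
-- 	return x & 16777215
--
-- def next_secret(x: int) -> int:
-- 	x = prune(mix(x, x << 6))
-- 	x = prune(mix(x, x >> 5))
-- 	x = prune(mix(x, x << 11))
-- 	return x
--
-- def part_2(puzzle_input: str) -> int:
-- 	seeds = (int(d) for d in puzzle_input.split('\n'))
-- 	prices = []
-- 	for i, seed in enumerate(seeds):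
-- 		prices.append((seed, ))
-- 		for _ in range(2000):
-- 			seed = next_secret(seed)
-- 			prices[i] += (seed % 10, )
-- 	diffs = [tuple(d[i+1]-d[i] for i in range(2000)) for d in prices]
-- 	values = defaultdict(int)
-- 	for i, price in enumerate(prices):
-- 		seen = set()
-- 		for j in range(1997):
-- 			seq = diffs[i][j:j+4]
-- 			val = price[j+4]
-- 			if not seq in seen:
-- 				seen.add(seq)
-- 				values[seq] += val
-- 	return max(values.values())
-- ===== SOURCE B (Python) =====
-- from collections import defaultdict
--
-- def mix(x: int, y: int) -> int:
-- 	return x ^ y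
--
-- def prune(x: int) -> int:
-- 	return x & 16777215
--
-- def next_secret(x: int) -> int:
-- 	x = prune(mix(x, x << 6))
-- 	x = prune(mix(x, x >> 5))
-- 	x = prune(mix(x, x << 11))
-- 	return x
--
-- def part_2(puzzle_input: str) -> int:
-- 	values = defaultdict(int)
-- 	for line in puzzle_input.split('\n'):
-- 		s = int(line)
-- 		prev = s
-- 		window = ()
-- 		seen = set()
-- 		for _ in range(2000):
-- 			s = next_secret(s)
-- 			p = s % 10
-- 			window = window + (p - prev,)
-- 			if len(window) > 4:
-- 				window = window[1:]
-- 			prev = p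
-- 			if len(window) == 4 and window not in seen:
-- 				seen.add(window)
-- 				values[window] += p
-- 	return max(values.values())
-- ===== Notes on version B (the rewrite author's own statement) =====
-- stated objective: faster
-- what changed: A makes three passes per seed (build a 2001-tuple of prices by repeated tuple concatenation, build a 2000-tuple of diffs, then scan 1997 length-4 slices); B is a single streaming pass per seed that keeps only the previous price and a rolling window of the last four diffs, never materialising the price/diff lists.
import Mathlib
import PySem

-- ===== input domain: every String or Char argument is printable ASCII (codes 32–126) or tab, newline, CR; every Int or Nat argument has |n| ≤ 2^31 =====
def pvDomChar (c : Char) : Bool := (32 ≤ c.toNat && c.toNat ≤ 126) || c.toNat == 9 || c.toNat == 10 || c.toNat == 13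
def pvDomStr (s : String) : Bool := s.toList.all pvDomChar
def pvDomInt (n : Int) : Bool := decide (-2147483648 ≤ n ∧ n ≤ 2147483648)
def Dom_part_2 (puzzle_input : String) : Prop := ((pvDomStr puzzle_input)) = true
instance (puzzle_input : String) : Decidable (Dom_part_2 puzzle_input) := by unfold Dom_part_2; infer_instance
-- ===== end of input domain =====

-- B fuses A's three passes (build all price tuples, build all diff tuples, scan windows) into one
-- streaming pass per seed with a rolling window of the last four diffs (avoids A's repeated tuple copying).

-- ===== PORT A =====
def mix (x y : Int) : Int := PySem.Int.bxor x y

def prune (x : Int) : Int := PySem.Int.band x 16777215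

def next_secret (x : Int) : Int :=
  let x1 := prune (mix x (x <<< 6))
  let x2 := prune (mix x1 (x1 >>> 5))
  prune (mix x2 (x2 <<< 11))

def part_2 (puzzle_input : String) : Int :=
  -- seeds = (int(d) for d in puzzle_input.split('\n')); int() failure is excluded by Pre_part_2
  let seeds := ((PySem.Str.split? puzzle_input "\n").getD []).map (fun d => (PySem.Int.ofStr? d).getD 0)
  let prices : List (List Int) :=
    seeds.foldl (fun prices seed =>
      let p := (PySem.List.pyRange 0 2000).foldl
        (fun (st : Int × List Int) _ =>
          let s := next_secret st.1
          (s, st.2 ++ [PySem.Int.mod s 10]))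
        (seed, [seed])
      prices ++ [p.2]) []
  let diffs := prices.map (fun dl =>
    (PySem.List.pyRange 0 2000).map (fun i => PySem.List.pyGetD dl (i + 1) 0 - PySem.List.pyGetD dl i 0))
  let values := (PySem.List.enumerate prices).foldl
    (fun (values : PySem.Dict (List Int) Int) ip =>
      ((PySem.List.pyRange 0 1997).foldl
        (fun (st : PySem.Set (List Int) × PySem.Dict (List Int) Int) j =>
          let seq := PySem.List.slice (PySem.List.pyGetD diffs ip.1 []) (some j) (some (j + 4))
          let val := PySem.List.pyGetD ip.2 (j + 4) 0
          if st.1.contains seq then st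
          else (PySem.Set.add st.1 seq, st.2.modify seq 0 (· + val)))
        (PySem.Set.empty, values)).2)
    PySem.Dict.empty
  (PySem.List.max? values.values (fun v => v)).getD 0   -- max() of a list that is nonempty under Pre_

-- ===== PORT B =====
-- one streaming step per secret: state = (secret, prev price, window of last ≤4 diffs, seen, values)
def bstep (st : Int × Int × List Int × PySem.Set (List Int) × PySem.Dict (List Int) Int) (_ : Int) :
    Int × Int × List Int × PySem.Set (List Int) × PySem.Dict (List Int) Int :=
  let s := next_secret st.1
  let p := PySem.Int.mod s 10
  let w0 := st.2.2.1 ++ [p - st.2.1]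
  let w := if w0.length > 4 then PySem.List.slice w0 (some 1) none else w0
  if w.length == 4 && !(st.2.2.2.1.contains w)
  then (s, p, w, PySem.Set.add st.2.2.2.1 w, st.2.2.2.2.modify w 0 (· + p))
  else (s, p, w, st.2.2.2.1, st.2.2.2.2)

def part_2_alt (puzzle_input : String) : Int :=
  let values := ((PySem.Str.split? puzzle_input "\n").getD []).foldl
    (fun (values : PySem.Dict (List Int) Int) line =>
      let s := (PySem.Int.ofStr? line).getD 0
      let st := (PySem.List.pyRange 0 2000).foldl bstep (s, s, ([] : List Int), PySem.Set.empty, values)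
      st.2.2.2.2)
    PySem.Dict.empty
  (PySem.List.max? values.values (fun v => v)).getD 0

-- ===== PRECONDITION & SPEC =====
-- Pre_ excludes exactly the inputs where Python's int(line) raises ValueError (both A and B raise there).
def Pre_part_2 (puzzle_input : String) : Prop :=
  ∀ line ∈ (PySem.Str.split? puzzle_input "\n").getD [], (PySem.Int.ofStr? line).isSome = true
instance (puzzle_input : String) : Decidable (Pre_part_2 puzzle_input) := by unfold Pre_part_2; infer_instance

def pvWitness_part_2 : String := "123\n-7"

def Spec_part_2 (puzzle_input : String) (out : Int) : Prop := out = part_2_alt puzzle_input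
instance (puzzle_input : String) (out : Int) : Decidable (Spec_part_2 puzzle_input out) := by unfold Spec_part_2; infer_instance

-- ===== CLAIM (what is proved, stated in full; the proofs are below) =====
def Claim_equal_part_2 : Prop := ∀ (puzzle_input : String), Dom_part_2 puzzle_input → Pre_part_2 puzzle_input → Spec_part_2 puzzle_input (part_2 puzzle_input)

-- ===== LEMMAS AND PROOFS =====

-- the price sequence of one seed: priceAt s0 0 = s0 (A's raw first tuple entry), priceAt s0 (k+1) = (k+1)-th secret mod 10
def priceAt (s0 : Int) : Nat → Int
  | 0 => s0
  | (k+1) => PySem.Int.mod (next_secret^[k+1] s0) 10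

def dAt (s0 : Int) (k : Nat) : Int := priceAt s0 (k+1) - priceAt s0 k

def Pl (s0 : Int) (n : Nat) : List Int := s0 :: (List.range n).map (fun k => PySem.Int.mod (next_secret^[k+1] s0) 10)

def Dl (s0 : Int) (n : Nat) : List Int := (List.range n).map (dAt s0)

def winAt (s0 : Int) (j : Nat) : List Int := [dAt s0 j, dAt s0 (j+1), dAt s0 (j+2), dAt s0 (j+3)]

-- one step of A's window scan, at window start j (the common shape both ports reduce to)
def astep (s0 : Int) (st : PySem.Set (List Int) × PySem.Dict (List Int) Int) (j : Nat) :
    PySem.Set (List Int) × PySem.Dict (List Int) Int :=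
  if st.1.contains (winAt s0 j) then st
  else (PySem.Set.add st.1 (winAt s0 j), st.2.modify (winAt s0 j) 0 (· + priceAt s0 (j+4)))

lemma build_eq (s0 : Int) (n : Nat) :
    (PySem.List.pyRange 0 (n : Int)).foldl
      (fun (st : Int × List Int) _ =>
        let s := next_secret st.1
        (s, st.2 ++ [PySem.Int.mod s 10]))
      (s0, [s0])
    = (next_secret^[n] s0, Pl s0 n) := by
  rw [PySem.List.pyRange_zero_nat, List.foldl_map]
  induction n with
  | zero => simp [Pl]
  | succ m ih =>
    rw [List.range_succ, List.foldl_append, ih]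
    simp [Pl, List.range_succ, Function.iterate_succ_apply']

lemma pyGetD_Pl (s0 : Int) (n m : Nat) (h : m ≤ n) :
    PySem.List.pyGetD (Pl s0 n) (m : Int) 0 = priceAt s0 m := by
  rw [PySem.List.pyGetD_natCast]
  cases m with
  | zero => simp [Pl, priceAt]
  | succ k =>
    simp [Pl, priceAt, List.getD]
    rw [List.getElem?_range (by omega : k < n)]
    simp

lemma diffs_eq (s0 : Int) (n : Nat) :
    (PySem.List.pyRange 0 (n : Int)).map
      (fun i => PySem.List.pyGetD (Pl s0 n) (i + 1) 0 - PySem.List.pyGetD (Pl s0 n) i 0)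
    = Dl s0 n := by
  rw [PySem.List.pyRange_zero_nat, List.map_map, Dl]
  apply List.map_congr_left
  intro k hk
  rw [List.mem_range] at hk
  have h1 : ((k : Int) + 1) = ((k + 1 : Nat) : Int) := by push_cast; ring
  simp only [Function.comp_apply, h1, dAt,
    pyGetD_Pl s0 n (k+1) (by omega), pyGetD_Pl s0 n k (by omega)]

lemma length_Dl (s0 : Int) (n : Nat) : (Dl s0 n).length = n := by simp [Dl]

lemma Dl_succ (s0 : Int) (k : Nat) : Dl s0 (k+1) = Dl s0 k ++ [dAt s0 k] := by
  simp [Dl, List.range_succ]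

lemma drop_Dl (s0 : Int) (n j : Nat) (h : n = j + 4) : (Dl s0 n).drop j = winAt s0 j := by
  subst h
  have : List.range (j + 4) = List.range j ++ [j, j+1, j+2, j+3] := by
    simp [List.range_succ, List.append_assoc]
  rw [Dl, this, List.map_append, List.drop_append_of_le_length (by simp)]
  simp [winAt]

lemma slice_Dl (s0 : Int) (n j : Nat) (h : j + 4 ≤ n) :
    PySem.List.slice (Dl s0 n) (some (j : Int)) (some ((j : Int) + 4)) = winAt s0 j := by
  have h4 : ((j : Int) + 4) = (j : Int) + ((4 : Nat) : Int) := by norm_num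
  rw [h4, PySem.List.slice_natCast_add]
  obtain ⟨m, rfl⟩ : ∃ m, n = (j + 4) + m := ⟨n - (j+4), by omega⟩
  rw [Dl, List.range_add, List.map_append, List.drop_append_of_le_length (by simp),
    List.take_append_of_le_length (by simp), ← Dl, drop_Dl s0 (j+4) j rfl]
  simp [winAt]

set_option maxRecDepth 8192 in
lemma innerA_eq (s0 : Int) (v : PySem.Dict (List Int) Int) :
    ((PySem.List.pyRange 0 1997).foldl
      (fun (st : PySem.Set (List Int) × PySem.Dict (List Int) Int) j =>
        let seq := PySem.List.slice (Dl s0 2000) (some j) (some (j + 4))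
        let val := PySem.List.pyGetD (Pl s0 2000) (j + 4) 0
        if st.1.contains seq then st
        else (PySem.Set.add st.1 seq, st.2.modify seq 0 (· + val)))
      (PySem.Set.empty, v)).2 = ((List.range 1997).foldl (astep s0) (PySem.Set.empty, v)).2 := by
  rw [show (1997 : Int) = ((1997 : Nat) : Int) by norm_num, PySem.List.pyRange_zero_nat,
    List.foldl_map]
  refine congrArg Prod.snd (PySem.List.foldl_congr_mem' (List.range 1997) _ (astep s0)
    (PySem.Set.empty, v) ?_)
  intro j hj st
  rw [List.mem_range] at hj
  dsimp only
  have h1 : ((j : Int) + 4) = ((j + 4 : Nat) : Int) := by push_cast; ring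
  rw [slice_Dl s0 2000 j (by omega), h1, pyGetD_Pl s0 2000 (j+4) (by omega)]
  rfl

lemma range_sub3_succ (k : Nat) (h : 3 ≤ k) :
    List.range (k + 1 - 3) = List.range (k - 3) ++ [k - 3] := by
  rw [show k + 1 - 3 = (k - 3) + 1 by omega, List.range_succ]

-- the streaming invariant: after k steps B holds the k-th secret, the k-th price, the last ≤4 diffs,
-- and exactly the (seen, values) state A's window scan reaches after its first k-3 window starts
lemma binv (s0 : Int) (v0 : PySem.Dict (List Int) Int) (k : Nat) :
    (PySem.List.pyRange 0 (k : Int)).foldl bstep (s0, s0, ([] : List Int), PySem.Set.empty, v0)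
    = (next_secret^[k] s0, priceAt s0 k, (Dl s0 k).drop (k - 4),
       (List.range (k - 3)).foldl (astep s0) (PySem.Set.empty, v0)) := by
  induction k with
  | zero => simp [Dl, priceAt]
  | succ k ih =>
    rw [show ((k+1 : Nat) : Int) = ((k : Nat) : Int) + 1 by push_cast; ring,
      PySem.List.pyRange_one_succ_right (by positivity), List.foldl_append, ih]
    clear ih
    simp only [List.foldl_cons, List.foldl_nil]
    rw [bstep]
    dsimp only
    have hs : next_secret (next_secret^[k] s0) = next_secret^[k+1] s0 :=
      (Function.iterate_succ_apply' next_secret k s0).symm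
    have hp : PySem.Int.mod (next_secret^[k+1] s0) 10 = priceAt s0 (k+1) := rfl
    have hw0 : (Dl s0 k).drop (k - 4) ++ [priceAt s0 (k+1) - priceAt s0 k]
        = (Dl s0 (k+1)).drop (k - 4) := by
      rw [Dl_succ, List.drop_append_of_le_length (by rw [length_Dl]; omega)]
      rfl
    rw [hs, hp, hw0]
    have hlen : ((Dl s0 (k+1)).drop (k-4)).length = (k+1) - (k-4) := by
      rw [List.length_drop, length_Dl]
    by_cases h4 : 4 ≤ k
    · -- k ≥ 4: window trimmed back to 4, always emits at window start j = k-3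
      have hgt : ((Dl s0 (k+1)).drop (k-4)).length > 4 := by omega
      rw [if_pos hgt, PySem.List.slice_from_one, List.tail_drop,
        show (k - 4) + 1 = k - 3 by omega, drop_Dl s0 (k+1) (k-3) (by omega)]
      have hlen4 : (winAt s0 (k-3)).length = 4 := rfl
      rw [hlen4, show k + 1 - 4 = k - 3 by omega, drop_Dl s0 (k+1) (k-3) (by omega),
        range_sub3_succ k (by omega), List.foldl_append, List.foldl_cons, List.foldl_nil,
        astep, show (k - 3) + 4 = k + 1 by omega]
      simp only [beq_self_eq_true, Bool.true_and]
      by_cases hc : (((List.range (k - 3)).foldl (astep s0) (PySem.Set.empty, v0)).1.contains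
          (winAt s0 (k-3))) = true
      · rw [if_pos hc, hc]
        simp
      · rw [if_neg hc]
        rw [Bool.not_eq_true] at hc
        rw [hc]
        simp
    · -- k < 4: window still growing; emits exactly when it reaches length 4, i.e. k = 3
      have hle : ¬ ((Dl s0 (k+1)).drop (k-4)).length > 4 := by omega
      rw [if_neg hle]
      rw [show k - 4 = 0 by omega, List.drop_zero, show k + 1 - 4 = 0 by omega, List.drop_zero]
      by_cases h3 : k = 3
      · subst h3
        have hD : Dl s0 (3+1) = winAt s0 0 := by
          have := drop_Dl s0 (3+1) 0 (by omega)
          simpa using this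
        rw [hD]
        have hlen4 : ((winAt s0 0).length == 4) = true := rfl
        rw [hlen4, Bool.true_and, show (3:Nat) - 3 = 0 by omega, show 3 + 1 - 3 = 1 by omega]
        simp only [List.range_zero, List.range_one, List.foldl_nil, List.foldl_cons]
        rw [astep]
        dsimp only
        norm_num [PySem.Set.empty]
      · have hlv : ((Dl s0 (k+1)).length == 4) = false := by
          rw [length_Dl]; simp; omega
        rw [hlv, Bool.false_and, show k + 1 - 3 = k - 3 by omega]
        simp

-- A's values loop over enumerate(prices), with diffs looked up by position in the full list
lemma enum_fold (suf pre : List Int) (v : PySem.Dict (List Int) Int) :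
    (PySem.List.enumerate (suf.map (fun s => Pl s 2000)) (pre.length : Int)).foldl
      (fun (values : PySem.Dict (List Int) Int) ip =>
        ((PySem.List.pyRange 0 1997).foldl
          (fun (st : PySem.Set (List Int) × PySem.Dict (List Int) Int) j =>
            let seq := PySem.List.slice
              (PySem.List.pyGetD ((pre ++ suf).map (fun s => Dl s 2000)) ip.1 []) (some j) (some (j + 4))
            let val := PySem.List.pyGetD ip.2 (j + 4) 0
            if st.1.contains seq then st
            else (PySem.Set.add st.1 seq, st.2.modify seq 0 (· + val)))
          (PySem.Set.empty, values)).2)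
      v
    = suf.foldl (fun v s => ((List.range 1997).foldl (astep s) (PySem.Set.empty, v)).2) v := by
  induction suf generalizing pre v with
  | nil => simp [PySem.List.enumerate_nil]
  | cons s suf ih =>
    rw [List.map_cons, PySem.List.enumerate_cons, List.foldl_cons, List.foldl_cons]
    have hidx : PySem.List.pyGetD ((pre ++ s :: suf).map (fun s => Dl s 2000)) ((pre.length : Nat) : Int) []
        = Dl s 2000 := by
      rw [PySem.List.pyGetD_natCast, List.map_append, List.getD_eq_getElem?_getD,
        List.getElem?_append_right (by simp)]
      simp
    have hstep : ∀ w : PySem.Dict (List Int) Int,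
        ((PySem.List.pyRange 0 1997).foldl
          (fun (st : PySem.Set (List Int) × PySem.Dict (List Int) Int) j =>
            let seq := PySem.List.slice
              (PySem.List.pyGetD ((pre ++ s :: suf).map (fun s => Dl s 2000)) (((pre.length : Nat) : Int), Pl s 2000).1 []) (some j) (some (j + 4))
            let val := PySem.List.pyGetD (((pre.length : Nat) : Int), Pl s 2000).2 (j + 4) 0
            if st.1.contains seq then st
            else (PySem.Set.add st.1 seq, st.2.modify seq 0 (· + val)))
          (PySem.Set.empty, w)).2
        = ((List.range 1997).foldl (astep s) (PySem.Set.empty, w)).2 := by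
      intro w
      dsimp only
      rw [hidx]
      exact innerA_eq s w
    rw [hstep]
    have hlen : ((pre.length : Nat) : Int) + 1 = (((pre ++ [s]).length : Nat) : Int) := by
      simp
    rw [hlen]
    have := ih (pre ++ [s]) (((List.range 1997).foldl (astep s) (PySem.Set.empty, v)).2)
    rw [List.append_assoc] at this
    simpa using this

lemma prices_fold_eq (seeds : List Int) :
    seeds.foldl (fun prices seed =>
      let p := (PySem.List.pyRange 0 2000).foldl
        (fun (st : Int × List Int) _ =>
          let s := next_secret st.1
          (s, st.2 ++ [PySem.Int.mod s 10]))
        (seed, [seed])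
      prices ++ [p.2]) []
    = seeds.map (fun s => Pl s 2000) := by
  have h : ∀ (acc : List (List Int)) (seed : Int),
      (fun (prices : List (List Int)) seed =>
        let p := (PySem.List.pyRange 0 2000).foldl
          (fun (st : Int × List Int) _ =>
            let s := next_secret st.1
            (s, st.2 ++ [PySem.Int.mod s 10]))
          (seed, [seed])
        prices ++ [p.2]) acc seed
      = acc ++ [Pl seed 2000] := by
    intro acc seed
    dsimp only
    rw [show (2000 : Int) = ((2000 : Nat) : Int) by norm_num, build_eq]
  rw [PySem.List.foldl_congr_mem' _ _ (fun acc seed => acc ++ [Pl seed 2000]) []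
    (fun x _ acc => h acc x)]
  exact PySem.List.foldl_append_singleton_eq_map _ _ []

set_option maxRecDepth 8192 in
lemma part_2_eq_alt (puzzle_input : String) : part_2 puzzle_input = part_2_alt puzzle_input := by
  unfold part_2 part_2_alt
  dsimp only
  rw [prices_fold_eq]
  generalize hl : (PySem.Str.split? puzzle_input "\n").getD [] = lines
  have hdiffs : ((lines.map (fun d => (PySem.Int.ofStr? d).getD 0)).map (fun s => Pl s 2000)).map
      (fun dl => (PySem.List.pyRange 0 2000).map
        (fun i => PySem.List.pyGetD dl (i + 1) 0 - PySem.List.pyGetD dl i 0))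
      = (lines.map (fun d => (PySem.Int.ofStr? d).getD 0)).map (fun s => Dl s 2000) := by
    rw [List.map_map]
    apply List.map_congr_left
    intro s _
    simp only [Function.comp_apply]
    rw [show (2000 : Int) = ((2000 : Nat) : Int) by norm_num, diffs_eq]
  rw [hdiffs]
  congr 3
  have hA := enum_fold (lines.map (fun d => (PySem.Int.ofStr? d).getD 0)) [] PySem.Dict.empty
  simp only [List.nil_append, List.length_nil, Nat.cast_zero] at hA
  rw [hA]
  have hB : ∀ (v : PySem.Dict (List Int) Int) (line : String),
      ((PySem.List.pyRange 0 2000).foldl bstep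
        ((PySem.Int.ofStr? line).getD 0, (PySem.Int.ofStr? line).getD 0, ([] : List Int),
          PySem.Set.empty, v)).2.2.2.2
      = ((List.range 1997).foldl (astep ((PySem.Int.ofStr? line).getD 0)) (PySem.Set.empty, v)).2 := by
    intro v line
    rw [show (2000 : Int) = ((2000 : Nat) : Int) by norm_num, binv]
  rw [List.foldl_map]
  apply PySem.List.foldl_congr_mem'
  intro line _ v
  dsimp only
  exact (hB v line).symm

-- ===== VERDICT (by name: the statement is the Claim_ definition above) =====
theorem part_2_spec : Claim_equal_part_2 := by
  intro s _ _
  unfold Spec_part_2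
  exact part_2_eq_alt s
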